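-- pv_equiv track=rewrite | github.com/lg995745318/- | BIOES.py | mark_sentence
-- ===== SOURCE A (Python) =====
-- def mark_sentence(s, mark_dict):
--     if s:
--         for key in mark_dict.keys():
--             result = s.split(key,1)
--             if len(result) > 1:
--                 return mark_sentence(result[0], mark_dict) + [{key:mark_dict[key]}] + mark_sentence(result[1], mark_dict)
--         return [{s:'O'}]
--     else:
--         return []
-- ===== SOURCE B (Python) =====
-- def mark_sentence(s, mark_dict):
--     if not s:
--         return []
--     # worklist of in-order items: raw text fragments (str) or resolved markers (dict)
--     items = [s]
--     for key, val in mark_dict.items():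
--         new_items = []
--         append = new_items.append
--         for it in items:
--             if isinstance(it, dict):
--                 append(it)
--             else:
--                 first = True
--                 for piece in it.split(key):
--                     if first:
--                         first = False
--                     else:
--                         append({key: val})
--                     if piece:
--                         append(piece)
--         items = new_items
--     return [it if isinstance(it, dict) else {it: 'O'} for it in items]
-- ===== Notes on version B (the rewrite author's own statement) =====
-- stated objective: alternative
-- what changed: A's recursion (find first matching key, split once, recurse on both halves) is replaced by one iterative pass per dictionary entry over an in-order worklist that holds unresolved text fragments and resolved markers, splitting each fragment on all occurrences of the key at once.
-- outside the precondition, e.g. on mark_sentence('ab', {'': 'Y'}): A raises ValueError, B raises ValueError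
import Mathlib
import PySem

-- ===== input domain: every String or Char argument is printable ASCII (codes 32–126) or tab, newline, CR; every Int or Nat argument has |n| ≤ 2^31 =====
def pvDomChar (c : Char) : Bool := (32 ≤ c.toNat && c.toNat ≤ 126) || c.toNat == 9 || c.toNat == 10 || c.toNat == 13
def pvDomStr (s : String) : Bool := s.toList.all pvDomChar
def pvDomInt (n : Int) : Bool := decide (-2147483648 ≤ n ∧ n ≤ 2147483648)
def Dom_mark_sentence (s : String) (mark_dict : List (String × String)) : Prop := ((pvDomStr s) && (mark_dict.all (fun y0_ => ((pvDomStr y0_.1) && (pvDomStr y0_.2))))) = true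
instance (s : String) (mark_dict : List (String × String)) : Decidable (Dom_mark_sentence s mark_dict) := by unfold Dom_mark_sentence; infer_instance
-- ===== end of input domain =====

-- B replaces A's recursive first-match splitting by iterative key-by-key passes over an
-- in-order worklist of text fragments and resolved markers (objective: alternative decomposition).

-- ===== PORT A =====
-- s.split(sep, 1) hand-ported: 'some (l, r)' means the split is [l, r] (sep occurs, split at
-- the leftmost occurrence); 'none' means no occurrence (Python returns [s]) OR sep = ""
-- (where Python raises ValueError — those inputs are excluded by Pre_, so the port is exact
-- on the admitted domain).
def splitOnceCh : List Char → List Char → Option (List Char × List Char)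
  | _, [] => none
  | sep, c :: rest =>
    if sep ≠ [] ∧ sep.isPrefixOf (c :: rest) then some ([], (c :: rest).drop sep.length)
    else (splitOnceCh sep rest).map (fun p => (c :: p.1, p.2))

-- structural fact about splitOnceCh, needed for termination of the two ports
theorem splitOnceCh_eq_some {sep s l r : List Char}
    (h : splitOnceCh sep s = some (l, r)) : sep ≠ [] ∧ s = l ++ sep ++ r := by
  induction s generalizing l r with
  | nil => simp [splitOnceCh] at h
  | cons c rest ih =>
    rw [splitOnceCh] at h
    split at h
    · rename_i hc
      obtain ⟨hsep, hpre⟩ := hc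
      rw [List.isPrefixOf_iff_prefix] at hpre
      obtain ⟨t, ht⟩ := hpre
      simp only [Option.some.injEq, Prod.mk.injEq] at h
      obtain ⟨hl, hr⟩ := h
      subst hl
      refine ⟨hsep, ?_⟩
      rw [← hr, ← ht, List.drop_left]
      simp
    · cases hrec : splitOnceCh sep rest with
      | none => rw [hrec] at h; simp at h
      | some p =>
        obtain ⟨p1, p2⟩ := p
        rw [hrec] at h
        simp only [Option.map_some, Option.some.injEq, Prod.mk.injEq] at h
        obtain ⟨hl, hr⟩ := h
        obtain ⟨hsep, hsp⟩ := ih hrec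
        subst hl; subst hr
        exact ⟨hsep, by simp [hsp]⟩

theorem splitOnceCh_some_lengths {sep s l r : List Char}
    (h : splitOnceCh sep s = some (l, r)) : l.length < s.length ∧ r.length < s.length := by
  obtain ⟨hsep, hs⟩ := splitOnceCh_eq_some h
  have : 0 < sep.length := List.length_pos_iff.mpr hsep
  subst hs
  simp only [List.length_append]
  omega

-- the 'for key in mark_dict.keys(): result = s.split(key, 1); if len(result) > 1: …' scan
def findKey (s : List Char) : List (String × String) → Option (String × List Char × List Char)
  | [] => none
  | (k, _) :: rest =>
    match splitOnceCh k.toList s with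
    | some (l, r) => some (k, l, r)
    | none => findKey s rest

theorem findKey_eq_some {s : List Char} {ps : List (String × String)} {k : String}
    {l r : List Char} (h : findKey s ps = some (k, l, r)) :
    splitOnceCh k.toList s = some (l, r) := by
  induction ps with
  | nil => simp [findKey] at h
  | cons p rest ih =>
    obtain ⟨k', v'⟩ := p
    rw [findKey] at h
    cases hs : splitOnceCh k'.toList s with
    | some p2 =>
      obtain ⟨l', r'⟩ := p2
      rw [hs] at h
      simp only [Option.some.injEq, Prod.mk.injEq] at h
      obtain ⟨hk, hl, hr⟩ := h
      subst hk; subst hl; subst hr; exact hs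
    | none => rw [hs] at h; exact ih h

-- recursive core of A ('mark_sentence' body, on char lists)
def markA (d : PySem.Dict String String) (s : List Char) : List (List (String × String)) :=
  if s = [] then []
  else
    match hf : findKey s d.items with
    | some (k, l, r) => markA d l ++ [[(k, d.getD k "")]] ++ markA d r
    | none => [[(String.ofList s, "O")]]
termination_by s.length
decreasing_by
  · exact (splitOnceCh_some_lengths (findKey_eq_some hf)).1
  · exact (splitOnceCh_some_lengths (findKey_eq_some hf)).2

def mark_sentence (s : String) (mark_dict : List (String × String)) : List (List (String × String)) :=
  markA (PySem.Dict.ofList mark_dict) s.toList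

-- ===== PORT B =====
-- t.split(key): all the pieces, in order ('none' impossible for the admitted nonempty keys)
def piecesCh (sep : List Char) (s : List Char) : List (List Char) :=
  match h : splitOnceCh sep s with
  | none => [s]
  | some (l, r) => l :: piecesCh sep r
termination_by s.length
decreasing_by exact (splitOnceCh_some_lengths h).2

-- 'if piece: new_items.append(piece)'
def fragIt (t : List Char) : List (List Char ⊕ (String × String)) :=
  if t = [] then [] else [Sum.inl t]

-- one text fragment split on one key: nonempty pieces interleaved with {key: val} markers
def splitItem (k v : String) (t : List Char) : List (List Char ⊕ (String × String)) :=
  match piecesCh k.toList t with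
  | [] => []
  | p :: ps => fragIt p ++ ps.flatMap (fun q => Sum.inr (k, v) :: fragIt q)

-- one pass of the worklist for one (key, val) entry
def stepB (k v : String) (items : List (List Char ⊕ (String × String))) :
    List (List Char ⊕ (String × String)) :=
  items.flatMap (fun it => match it with
    | Sum.inl t => splitItem k v t
    | Sum.inr m => [Sum.inr m])

-- final comprehension: remaining text fragments become {frag: 'O'}
def finalizeB (items : List (List Char ⊕ (String × String))) : List (List (String × String)) :=
  items.map (fun it => match it with
    | Sum.inl t => [(String.ofList t, "O")]
    | Sum.inr (k, v) => [(k, v)])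

def mark_sentence_alt (s : String) (mark_dict : List (String × String)) : List (List (String × String)) :=
  if s.toList = [] then []
  else
    finalizeB ((PySem.Dict.ofList mark_dict).items.foldl
      (fun items kv => stepB kv.1 kv.2 items) [Sum.inl s.toList])

-- ===== PRECONDITION & SPEC =====
-- Pre_ excludes nonempty inputs whose dictionary contains an empty-string key: Python's
-- str.split("") raises ValueError, so A raises whenever its recursion reaches that key on a
-- nonempty fragment (and B raises there too); on the rare excluded corners where no nonempty
-- fragment reaches the "" key, A still returns and B returns the same value (see cites).
def Pre_mark_sentence (s : String) (mark_dict : List (String × String)) : Prop :=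
  s = "" ∨ ∀ p ∈ mark_dict, p.1 ≠ ""
instance (s : String) (mark_dict : List (String × String)) : Decidable (Pre_mark_sentence s mark_dict) := by
  unfold Pre_mark_sentence; infer_instance

def pvWitness_mark_sentence : String × (List (String × String)) :=
  ("abcbd", [("b", "I"), ("d", "E")])

def Spec_mark_sentence (s : String) (mark_dict : List (String × String)) (out : List (List (String × String))) : Prop := out = mark_sentence_alt s mark_dict
instance (s : String) (mark_dict : List (String × String)) (out : List (List (String × String))) : Decidable (Spec_mark_sentence s mark_dict out) := by unfold Spec_mark_sentence; infer_instance

-- ===== CLAIM (what is proved, stated in full; the proofs are below) =====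
def Claim_equal_mark_sentence : Prop := ∀ (s : String) (mark_dict : List (String × String)), Dom_mark_sentence s mark_dict → Pre_mark_sentence s mark_dict → Spec_mark_sentence s mark_dict (mark_sentence s mark_dict)

-- ===== LEMMAS AND PROOFS =====

-- the B fold, as an explicit function of the pair list (for induction)
def processB (ps : List (String × String)) (items : List (List Char ⊕ (String × String))) :
    List (List Char ⊕ (String × String)) :=
  ps.foldl (fun its kv => stepB kv.1 kv.2 its) items

theorem processB_append_ps (ps qs : List (String × String)) (items) :
    processB (ps ++ qs) items = processB qs (processB ps items) := by
  simp [processB, List.foldl_append]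

theorem stepB_append (k v : String) (xs ys) :
    stepB k v (xs ++ ys) = stepB k v xs ++ stepB k v ys := by
  simp [stepB]

theorem processB_append (ps : List (String × String)) (xs ys) :
    processB ps (xs ++ ys) = processB ps xs ++ processB ps ys := by
  induction ps generalizing xs ys with
  | nil => simp [processB]
  | cons p rest ih =>
    simp only [processB, List.foldl_cons] at *
    rw [stepB_append, ih]

theorem processB_nil (ps : List (String × String)) : processB ps [] = [] := by
  induction ps with
  | nil => rfl
  | cons p rest ih => simpa [processB, stepB] using ih

theorem processB_marker (ps : List (String × String)) (m : String × String) :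
    processB ps [Sum.inr m] = [Sum.inr m] := by
  induction ps with
  | nil => rfl
  | cons p rest ih => simpa [processB, stepB] using ih

theorem piecesCh_ne_nil (sep s : List Char) : piecesCh sep s ≠ [] := by
  rw [piecesCh]
  split <;> simp

theorem splitOnceCh_none_iff {sep : List Char} (hsep : sep ≠ []) (s : List Char) :
    splitOnceCh sep s = none ↔ ¬ sep <:+: s := by
  induction s with
  | nil =>
    simp only [splitOnceCh, List.infix_nil]
    simpa using hsep
  | cons c rest ih =>
    rw [splitOnceCh]
    split
    · rename_i hc
      obtain ⟨-, hpre⟩ := hc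
      rw [List.isPrefixOf_iff_prefix] at hpre
      simp only [List.infix_cons_iff]
      constructor
      · intro h; simp at h
      · intro h; exact absurd (Or.inl hpre) h
    · rename_i hc
      have hnp : ¬ sep <+: (c :: rest) := by
        intro hp
        exact hc ⟨hsep, List.isPrefixOf_iff_prefix.mpr hp⟩
      rw [List.infix_cons_iff, Option.map_eq_none_iff, ih]
      tauto

theorem splitOnceCh_not_infix_left {sep s l r : List Char}
    (h : splitOnceCh sep s = some (l, r)) : ¬ sep <:+: l := by
  induction s generalizing l r with
  | nil => simp [splitOnceCh] at h
  | cons c rest ih =>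
    obtain ⟨hsep, -⟩ := splitOnceCh_eq_some h
    rw [splitOnceCh] at h
    split at h
    · simp only [Option.some.injEq, Prod.mk.injEq] at h
      rw [← h.1]
      simpa [List.infix_nil] using hsep
    · rename_i hc
      have hnp : ¬ sep <+: (c :: rest) := by
        intro hp
        exact hc ⟨hsep, List.isPrefixOf_iff_prefix.mpr hp⟩
      cases hrec : splitOnceCh sep rest with
      | none => rw [hrec] at h; simp at h
      | some p =>
        obtain ⟨p1, p2⟩ := p
        rw [hrec] at h
        simp only [Option.map_some, Option.some.injEq, Prod.mk.injEq] at h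
        obtain ⟨hl, -⟩ := h
        have ihp : ¬ sep <:+: p1 := ih hrec
        rw [← hl]
        intro hinf
        rw [List.infix_cons_iff] at hinf
        rcases hinf with hp | hinf
        · obtain ⟨-, hrest⟩ := splitOnceCh_eq_some hrec
          have hpre2 : (c :: p1) <+: (c :: rest) := ⟨sep ++ p2, by simp [hrest]⟩
          exact hnp (hp.trans hpre2)
        · exact ihp hinf

-- an occurrence-free separator stays occurrence-free on any infix
theorem splitOnceCh_none_of_infix {sep s t : List Char} (hsep : sep ≠ [])
    (hnone : splitOnceCh sep s = none) (hinf : t <:+: s) : splitOnceCh sep t = none := by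
  rw [splitOnceCh_none_iff hsep] at *
  exact fun h => hnone (h.trans hinf)

theorem piecesCh_of_none {sep s : List Char} (h : splitOnceCh sep s = none) :
    piecesCh sep s = [s] := by
  rw [piecesCh]
  split
  · rfl
  · rename_i l r hsome; rw [h] at hsome; cases hsome

theorem piecesCh_of_some {sep s l r : List Char} (h : splitOnceCh sep s = some (l, r)) :
    piecesCh sep s = l :: piecesCh sep r := by
  rw [piecesCh]
  split
  · rename_i hn; rw [h] at hn; cases hn
  · rename_i l' r' hsome; rw [h] at hsome; cases hsome; rfl

-- one pass leaves a fragment without the key untouched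
theorem stepB_no_occ {k v : String} {t : List Char} (ht : t ≠ [])
    (hnone : splitOnceCh k.toList t = none) : stepB k v [Sum.inl t] = [Sum.inl t] := by
  simp only [stepB, List.flatMap_cons, List.flatMap_nil, List.append_nil]
  rw [splitItem, piecesCh_of_none hnone]
  simp [fragIt, ht]

theorem processB_no_occ {ps : List (String × String)} {t : List Char} (ht : t ≠ [])
    (h : ∀ kv ∈ ps, splitOnceCh kv.1.toList t = none) :
    processB ps [Sum.inl t] = [Sum.inl t] := by
  induction ps with
  | nil => rfl
  | cons p rest ih =>
    simp only [processB, List.foldl_cons]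
    rw [stepB_no_occ ht (h p (by simp))]
    exact ih (fun kv hkv => h kv (by simp [hkv]))

theorem splitItem_nil (k v : String) : splitItem k v [] = [] := by
  rw [splitItem, piecesCh_of_none (by rw [splitOnceCh])]
  simp [fragIt]

theorem splitItem_cons {k v : String} {s l r : List Char}
    (h : splitOnceCh k.toList s = some (l, r)) :
    splitItem k v s = fragIt l ++ Sum.inr (k, v) :: splitItem k v r := by
  rw [splitItem, piecesCh_of_some h]
  cases hr : piecesCh k.toList r with
  | nil => exact absurd hr (piecesCh_ne_nil _ _)
  | cons p ps =>
    rw [splitItem, hr]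
    simp

theorem findKey_spec {s : List Char} {ps : List (String × String)} {k : String}
    {l r : List Char} (h : findKey s ps = some (k, l, r)) :
    ∃ v pre post, ps = pre ++ (k, v) :: post ∧
      (∀ kv ∈ pre, splitOnceCh kv.1.toList s = none) ∧
      splitOnceCh k.toList s = some (l, r) := by
  induction ps with
  | nil => simp [findKey] at h
  | cons p rest ih =>
    obtain ⟨k', v'⟩ := p
    rw [findKey] at h
    cases hs : splitOnceCh k'.toList s with
    | some p2 =>
      obtain ⟨l', r'⟩ := p2
      rw [hs] at h
      simp only [Option.some.injEq, Prod.mk.injEq] at h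
      obtain ⟨hk, hl, hr⟩ := h
      subst hk; subst hl; subst hr
      exact ⟨v', [], rest, by simp, by simp, hs⟩
    | none =>
      rw [hs] at h
      obtain ⟨v, pre, post, hps, hpre, hk⟩ := ih h
      exact ⟨v, (k', v') :: pre, post, by simp [hps], by
        intro kv hkv
        rcases List.mem_cons.mp hkv with rfl | hm
        · exact hs
        · exact hpre kv hm, hk⟩

theorem findKey_none {s : List Char} {ps : List (String × String)}
    (h : findKey s ps = none) : ∀ kv ∈ ps, splitOnceCh kv.1.toList s = none := by
  induction ps with
  | nil => simp
  | cons p rest ih =>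
    obtain ⟨k', v'⟩ := p
    rw [findKey] at h
    cases hs : splitOnceCh k'.toList s with
    | some p2 => rw [hs] at h; cases h
    | none =>
      rw [hs] at h
      intro kv hkv
      rcases List.mem_cons.mp hkv with rfl | hm
      · exact hs
      · exact ih h kv hm

theorem mem_keys_update {d : PySem.Dict String String} {ps : List (String × String)} {k : String}
    (h : k ∈ (d.update ps).keys) : k ∈ d.keys ∨ k ∈ ps.map (·.1) := by
  induction ps generalizing d with
  | nil => exact Or.inl h
  | cons p rest ih =>
    have : PySem.Dict.update d (p :: rest) = PySem.Dict.update (d.insert p.1 p.2) rest := by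
      simp [PySem.Dict.update]
    rw [this] at h
    rcases ih h with hm | hm
    · rcases (PySem.Dict.mem_keys_insert d p.1 k p.2).mp hm with rfl | hm2
      · exact Or.inr (by simp)
      · exact Or.inl hm2
    · exact Or.inr (by simp [hm])

theorem items_ofList_keys_ne {md : List (String × String)} (H : ∀ p ∈ md, p.1 ≠ "")
    {kv : String × String} (hkv : kv ∈ (PySem.Dict.ofList md).items) : kv.1 ≠ "" := by
  have hk : kv.1 ∈ (PySem.Dict.ofList md).keys := by
    simp only [PySem.Dict.keys]
    exact List.mem_map_of_mem hkv
  rcases mem_keys_update (d := PySem.Dict.empty) hk with hm | hm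
  · simp [PySem.Dict.empty, PySem.Dict.keys] at hm
  · obtain ⟨p, hp, hp1⟩ := List.mem_map.mp hm
    rw [← hp1]; exact H p hp

theorem finalizeB_append (xs ys) : finalizeB (xs ++ ys) = finalizeB xs ++ finalizeB ys := by
  simp [finalizeB]

-- fragments of the worklist are never empty-keyed away: all dict keys are nonempty strings
theorem items_toList_ne {md : List (String × String)} (H : ∀ p ∈ md, p.1 ≠ "")
    {kv : String × String} (hkv : kv ∈ (PySem.Dict.ofList md).items) : kv.1.toList ≠ [] := by
  have h1 := items_ofList_keys_ne H hkv
  intro hc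
  exact h1 (by simpa using congrArg String.ofList hc)

-- the main invariant: A's recursion computes exactly B's pass pipeline
theorem markA_eq_processB (md : List (String × String)) (H : ∀ p ∈ md, p.1 ≠ "") :
    ∀ n (s : List Char), s.length ≤ n →
      markA (PySem.Dict.ofList md) s =
        (if s = [] then []
         else finalizeB (processB (PySem.Dict.ofList md).items [Sum.inl s])) := by
  intro n
  induction n with
  | zero =>
    intro s hs
    have : s = [] := List.length_eq_zero_iff.mp (Nat.le_zero.mp hs)
    subst this
    rw [markA]; simp
  | succ n ihn =>
    intro s hs
    by_cases hnil : s = []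
    · subst hnil; rw [markA]; simp
    · rw [markA]
      simp only [if_neg hnil]
      split
      · rename_i k l r heq
        obtain ⟨v, pre, post, hitems, hpre, hk⟩ := findKey_spec heq
        obtain ⟨hsep, hsii⟩ := splitOnceCh_eq_some hk
        have hlen := splitOnceCh_some_lengths hk
        have hpre_ne : ∀ kv ∈ pre, kv.1.toList ≠ [] := by
          intro kv hkv
          exact items_toList_ne H (by rw [hitems]; simp [hkv])
        have hget : (PySem.Dict.ofList md).getD k "" = v := by
          have hmem : (k, v) ∈ (PySem.Dict.ofList md).items := by rw [hitems]; simp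
          have hg := PySem.Dict.get?_of_mem_items _ hmem (PySem.Dict.nodup_keys_ofList md)
          simp [PySem.Dict.getD, hg]
        have hlinf : l <:+: s := ⟨[], k.toList ++ r, by simp [hsii]⟩
        have hrinf : r <:+: s := ⟨l ++ k.toList, [], by simp [hsii]⟩
        -- the left fragment
        have hL : markA (PySem.Dict.ofList md) l = finalizeB (processB post (fragIt l)) := by
          by_cases hl : l = []
          · subst hl
            rw [markA]
            simp [fragIt, processB_nil, finalizeB]
          · rw [ihn l (by omega), if_neg hl]
            congr 1
            rw [hitems, fragIt, if_neg hl]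
            have h1 : processB pre [Sum.inl l] = [Sum.inl l] := by
              refine processB_no_occ hl ?_
              intro kv hkv
              exact splitOnceCh_none_of_infix (hpre_ne kv hkv) (hpre kv hkv) hlinf
            have h2 : stepB k v [Sum.inl l] = [Sum.inl l] :=
              stepB_no_occ hl ((splitOnceCh_none_iff hsep l).mpr (splitOnceCh_not_infix_left hk))
            calc processB (pre ++ (k, v) :: post) [Sum.inl l]
                = processB ((k, v) :: post) (processB pre [Sum.inl l]) := by
                  rw [processB_append_ps]
              _ = processB post (stepB k v [Sum.inl l]) := by rw [h1]; rfl
              _ = processB post [Sum.inl l] := by rw [h2]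
        -- the right remainder
        have hR : markA (PySem.Dict.ofList md) r = finalizeB (processB post (splitItem k v r)) := by
          by_cases hr : r = []
          · subst hr
            rw [markA]
            simp [splitItem_nil, processB_nil, finalizeB]
          · rw [ihn r (by omega), if_neg hr]
            congr 1
            rw [hitems]
            have h1 : processB pre [Sum.inl r] = [Sum.inl r] := by
              refine processB_no_occ hr ?_
              intro kv hkv
              exact splitOnceCh_none_of_infix (hpre_ne kv hkv) (hpre kv hkv) hrinf
            calc processB (pre ++ (k, v) :: post) [Sum.inl r]
                = processB ((k, v) :: post) (processB pre [Sum.inl r]) := by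
                  rw [processB_append_ps]
              _ = processB post (stepB k v [Sum.inl r]) := by rw [h1]; rfl
              _ = processB post (splitItem k v r) := by
                  congr 1
                  simp [stepB]
        -- assemble
        have hRHS : processB (PySem.Dict.ofList md).items [Sum.inl s] =
            processB post (fragIt l) ++ [Sum.inr (k, v)] ++ processB post (splitItem k v r) := by
          rw [hitems]
          have h1 : processB pre [Sum.inl s] = [Sum.inl s] := by
            refine processB_no_occ hnil ?_
            intro kv hkv
            exact hpre kv hkv
          calc processB (pre ++ (k, v) :: post) [Sum.inl s]
              = processB ((k, v) :: post) (processB pre [Sum.inl s]) := by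
                rw [processB_append_ps]
            _ = processB post (stepB k v [Sum.inl s]) := by rw [h1]; rfl
            _ = processB post (splitItem k v s) := by congr 1; simp [stepB]
            _ = processB post (fragIt l ++ [Sum.inr (k, v)] ++ splitItem k v r) := by
                rw [splitItem_cons hk]; simp
            _ = processB post (fragIt l) ++ [Sum.inr (k, v)] ++ processB post (splitItem k v r) := by
                rw [processB_append, processB_append, processB_marker]
        rw [hRHS, finalizeB_append, finalizeB_append, hL, hR, hget]
        simp [finalizeB]
      · rename_i heq
        have hall := findKey_none heq
        rw [processB_no_occ hnil hall]
        simp [finalizeB]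

-- ===== VERDICT (by name: the statement is the Claim_ definition above) =====
theorem mark_sentence_spec : Claim_equal_mark_sentence := by
  intro s md _ hpre
  unfold Spec_mark_sentence mark_sentence mark_sentence_alt
  rcases hpre with rfl | H
  · rw [markA]; simp
  · rw [markA_eq_processB md H s.toList.length s.toList le_rfl]
    split <;> rfl
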